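-- pv_equiv track=rewrite | github.com/pogross/adventofcode2018 | day05/alchemical_reduction.py | polymer_reaction
-- ===== SOURCE A (Python) =====
-- def polymer_reaction(polymer: str) -> str:
--     remaining_units = list(polymer)
--     processed_units = []
--
--     # pairwise check the last processed unit with the first remaining unit
--     while True:
--         # if there are no processed units no reaction can occur
--         if len(processed_units) == 0:
--             processed_units.append(remaining_units.pop(0))
--         else:
--             first_unit = processed_units[-1]
--             second_unit = remaining_units.pop(0)
--
--             # if of same type and of opposite polarity they cancle each other out
--             if is_same_type(first_unit, second_unit) and is_opposite_polarity(first_unit, second_unit):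
--                 processed_units.pop()
--             else:
--                 processed_units.append(second_unit)
--
--             if len(remaining_units) == 0:  # continue if units remain in queue
--                 break
--
--     return "".join(processed_units)
--
-- def is_opposite_polarity(first_unit: str, second_unit: str) -> bool:
--     both_lower = first_unit.islower() and second_unit.islower()
--     both_upper = first_unit.isupper() and second_unit.isupper()
--     if both_lower or both_upper:
--         return False
--     else:
--         return True
--
-- def is_same_type(first_unit: str, second_unit: str) -> bool:
--     if first_unit.lower() == second_unit.lower():
--         return True
--     else:
--         return False
-- ===== SOURCE B (Python) =====
-- def _reacts(a: str, b: str) -> bool: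
--     return a.lower() == b.lower() and not (
--         (a.islower() and b.islower()) or (a.isupper() and b.isupper())
--     )
--
--
-- def polymer_reaction(polymer: str) -> str:
--     # single stack pass: O(n) instead of repeated list.pop(0)
--     stack = []
--     for unit in polymer:
--         if stack and _reacts(stack[-1], unit):
--             stack.pop()
--         else:
--             stack.append(unit)
--     return "".join(stack)
-- ===== Notes on version B (the rewrite author's own statement) =====
-- stated objective: faster
-- what changed: Replaced the while-True queue machine with repeated list.pop(0) and break bookkeeping by a single for-loop stack pass that pushes each unit and pops on reaction.
-- outside the precondition, e.g. on polymer_reaction('a'): A raises IndexError, B returns 'a'; on polymer_reaction('aAb'): A raises IndexError, B returns 'b'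
import Mathlib
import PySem

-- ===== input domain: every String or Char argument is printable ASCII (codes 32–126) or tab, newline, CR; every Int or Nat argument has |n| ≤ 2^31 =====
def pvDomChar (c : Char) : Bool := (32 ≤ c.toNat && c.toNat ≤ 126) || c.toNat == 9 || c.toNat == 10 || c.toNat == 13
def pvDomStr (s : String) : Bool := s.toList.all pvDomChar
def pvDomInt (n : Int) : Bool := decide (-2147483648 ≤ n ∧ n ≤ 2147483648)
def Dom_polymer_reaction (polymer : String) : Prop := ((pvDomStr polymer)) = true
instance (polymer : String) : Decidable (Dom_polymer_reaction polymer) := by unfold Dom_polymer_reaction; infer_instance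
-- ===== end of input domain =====

-- B replaces A's while-True queue machine (repeated list.pop(0)) by a single stack pass;
-- equivalence is about the return value on inputs where A returns (Pre_ excludes A's IndexError inputs).

-- ===== PORT A =====
-- helper is_opposite_polarity, literal
def is_opposite_polarity (first_unit second_unit : Char) : Bool :=
  let both_lower := PySem.Chars.islower first_unit && PySem.Chars.islower second_unit
  let both_upper := PySem.Chars.isupper first_unit && PySem.Chars.isupper second_unit
  if both_lower || both_upper then false else true

-- helper is_same_type, literal
def is_same_type (first_unit second_unit : Char) : Bool :=
  if PySem.Chars.lowerChar first_unit == PySem.Chars.lowerChar second_unit then true else false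

-- A's while-True loop, recursion on the remaining queue; Python raises IndexError when
-- remaining is empty at the top of an iteration (the [] case) — value there is arbitrary
-- and those inputs are outside Pre_.
def pvLoopA (processed : List Char) (remaining : List Char) : List Char :=
  match remaining with
  | [] => processed  -- Python: remaining_units.pop(0) raises IndexError here
  | second_unit :: rest =>
    if processed.length == 0 then
      pvLoopA (processed ++ [second_unit]) rest
    else
      let first_unit := processed.getLastD ' '
      let processed' :=
        if is_same_type first_unit second_unit && is_opposite_polarity first_unit second_unit then
          processed.dropLast
        else
          processed ++ [second_unit]
      if rest.length == 0 then processed' else pvLoopA processed' rest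

def polymer_reaction (polymer : String) : String :=
  String.mk (pvLoopA [] polymer.toList)

-- ===== PORT B =====
-- _reacts from Source B, literal
def pvReactsB (a b : Char) : Bool :=
  PySem.Chars.lowerChar a == PySem.Chars.lowerChar b &&
    !((PySem.Chars.islower a && PySem.Chars.islower b) ||
      (PySem.Chars.isupper a && PySem.Chars.isupper b))

-- one step of Source B's for-loop (stack top at the end, as in the Python list)
def pvStepB (stack : List Char) (unit : Char) : List Char :=
  if stack.length != 0 && pvReactsB (stack.getLastD ' ') unit then
    stack.dropLast
  else
    stack ++ [unit]

def polymer_reaction_alt (polymer : String) : String :=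
  String.mk (polymer.toList.foldl pvStepB [])

-- ===== PRECONDITION & SPEC =====
-- A raises IndexError exactly when the polymer is empty or everything before its last unit
-- cancels away; there is no simpler closed form for that set than "the cancellation normal
-- form of polymer[:-1] is empty", so Pre_ states it via pvNorm, the spec-level normal form
-- (head-of-list stack recursion, independent of both ports).
def pvNorm (stack : List Char) : List Char → List Char
  | [] => stack.reverse
  | c :: cs =>
    match stack with
    | [] => pvNorm [c] cs
    | t :: ts =>
      if PySem.Chars.lowerChar t == PySem.Chars.lowerChar c &&
          !((PySem.Chars.islower t && PySem.Chars.islower c) ||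
            (PySem.Chars.isupper t && PySem.Chars.isupper c)) then
        pvNorm ts cs
      else
        pvNorm (c :: t :: ts) cs

def Pre_polymer_reaction (polymer : String) : Prop :=
  polymer.toList ≠ [] ∧ pvNorm [] polymer.toList.dropLast ≠ []
instance (polymer : String) : Decidable (Pre_polymer_reaction polymer) := by
  unfold Pre_polymer_reaction; infer_instance

def pvWitness_polymer_reaction : String := "ab"

def Spec_polymer_reaction (polymer : String) (out : String) : Prop := out = polymer_reaction_alt polymer
instance (polymer : String) (out : String) : Decidable (Spec_polymer_reaction polymer out) := by unfold Spec_polymer_reaction; infer_instance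

-- ===== CLAIM (what is proved, stated in full; the proofs are below) =====
def Claim_equal_polymer_reaction : Prop := ∀ (polymer : String), Dom_polymer_reaction polymer → Pre_polymer_reaction polymer → Spec_polymer_reaction polymer (polymer_reaction polymer)

-- ===== LEMMAS AND PROOFS =====

theorem reactsB_eq (a b : Char) :
    pvReactsB a b = (is_same_type a b && is_opposite_polarity a b) := by
  simp only [pvReactsB, is_same_type, is_opposite_polarity]
  by_cases h : PySem.Chars.lowerChar a == PySem.Chars.lowerChar b <;> simp [h]

-- A's loop computes exactly B's fold, from any state
theorem loopA_eq_foldl (remaining processed : List Char) :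
    pvLoopA processed remaining = remaining.foldl pvStepB processed := by
  induction remaining generalizing processed with
  | nil => simp [pvLoopA]
  | cons second rest ih =>
    rw [pvLoopA, List.foldl_cons]
    by_cases hp : processed.length == 0
    · have : processed = [] := by simpa using hp
      subst this
      simp [pvStepB, ih]
    · simp only [hp, if_neg, Bool.false_eq_true, not_false_eq_true]
      have hstep : pvStepB processed second =
          (if is_same_type (processed.getLastD ' ') second &&
                is_opposite_polarity (processed.getLastD ' ') second then
            processed.dropLast else processed ++ [second]) := by
        simp only [pvStepB, reactsB_eq]
        have : (processed.length != 0) = true := by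
          simp at hp ⊢; omega
        rw [this, Bool.true_and]
      by_cases hr : rest.length == 0
      · have : rest = [] := by simpa using hr
        subst this
        simp [hstep]
      · simp only [hr, Bool.false_eq_true, not_false_eq_true, if_neg, ih, hstep]

-- ===== VERDICT (by name: the statement is the Claim_ definition above) =====
theorem polymer_reaction_spec : Claim_equal_polymer_reaction := by
  intro polymer _ _
  unfold Spec_polymer_reaction polymer_reaction polymer_reaction_alt
  rw [loopA_eq_foldl]
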